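-- pv_equiv track=rewrite | github.com/SharkoStepan/AOIS | lab3/minimizer.py | build_karnaugh_map
-- ===== SOURCE A (Python) =====
-- from typing import List, Tuple, Set
--
-- def get_karnaugh_map_size(num_vars: int) -> Tuple[int, int]:
--     if num_vars == 2:
--         return 2, 2
--     elif num_vars == 3:
--         return 2, 4
--     elif num_vars == 4:
--         return 4, 4
--     else:
--         rows = 1 << (num_vars // 2)
--         cols = 1 << ((num_vars + 1) // 2)
--         return rows, cols
--
-- def build_karnaugh_map(minterms: List[int], num_vars: int) -> List[List[int]]:
--     rows, cols = get_karnaugh_map_size(num_vars)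
--     k_map = [[0 for _ in range(cols)] for _ in range(rows)]
--
--     def get_coordinates(num_bits):
--         gray = []
--         for i in range(1 << num_bits):
--             gray.append(i ^ (i >> 1))
--         return [format(g, f'0{num_bits}b') for g in gray]
--
--     row_bits = num_vars // 2
--     col_bits = (num_vars + 1) // 2
--     row_gray = get_coordinates(row_bits)
--     col_gray = get_coordinates(col_bits)
--
--     for i in range(rows):
--         for j in range(cols):
--             if num_vars == 1:
--                 binary = row_gray[i]
--             elif num_vars == 2:
--                 binary = row_gray[i][0] + col_gray[j][0]
--             elif num_vars == 3:
--                 binary = row_gray[i][0] + col_gray[j][0] + col_gray[j][1]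
--             elif num_vars == 4:
--                 binary = row_gray[i][0] + row_gray[i][1] + col_gray[j][0] + col_gray[j][1]
--             else:
--                 binary = row_gray[i][0] + row_gray[i][1] + col_gray[j][0] + col_gray[j][1] + col_gray[j][2]
--
--             decimal = int(binary, 2)
--             k_map[i][j] = 1 if decimal in minterms else 0
--
--     return k_map
-- ===== SOURCE B (Python) =====
-- def build_karnaugh_map(minterms, num_vars):
--     rows = 1 << (num_vars // 2)
--     cols = 1 << ((num_vars + 1) // 2)
--
--     row_bits = num_vars // 2
--     col_bits = (num_vars + 1) // 2
--
--     def gray_codes(num_bits):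
--         return [format(i ^ (i >> 1), f'0{num_bits}b') for i in range(1 << num_bits)]
--
--     row_gray = gray_codes(row_bits)
--     col_gray = gray_codes(col_bits)
--
--     def cell_value(i, j):
--         if num_vars == 1:
--             binary = row_gray[i]
--         elif num_vars == 2:
--             binary = row_gray[i][0] + col_gray[j][0]
--         elif num_vars == 3:
--             binary = row_gray[i][0] + col_gray[j][0] + col_gray[j][1]
--         elif num_vars == 4:
--             binary = row_gray[i][0] + row_gray[i][1] + col_gray[j][0] + col_gray[j][1]
--         else:
--             binary = row_gray[i][0] + row_gray[i][1] + col_gray[j][0] + col_gray[j][1] + col_gray[j][2]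
--         return int(binary, 2)
--
--     # index every cell by its decimal once, then scatter the minterms
--     positions = {}
--     for i in range(rows):
--         for j in range(cols):
--             positions.setdefault(cell_value(i, j), []).append((i, j))
--
--     k_map = [[0] * cols for _ in range(rows)]
--     for m in minterms:
--         for i, j in positions.get(m, []):
--             k_map[i][j] = 1
--     return k_map
-- ===== Notes on version B (the rewrite author's own statement) =====
-- stated objective: alternative
-- what changed: Instead of testing 'decimal in minterms' with a list scan inside every grid cell, B scans the cells once to build a dict mapping each cell decimal to its (i,j) positions, then scatters 1s into an all-zero grid by looking each minterm up in the dict; the shared Gray-code cell scan still dominates the run time, so the change is structural, not a measured speed-up.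
import Mathlib
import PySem

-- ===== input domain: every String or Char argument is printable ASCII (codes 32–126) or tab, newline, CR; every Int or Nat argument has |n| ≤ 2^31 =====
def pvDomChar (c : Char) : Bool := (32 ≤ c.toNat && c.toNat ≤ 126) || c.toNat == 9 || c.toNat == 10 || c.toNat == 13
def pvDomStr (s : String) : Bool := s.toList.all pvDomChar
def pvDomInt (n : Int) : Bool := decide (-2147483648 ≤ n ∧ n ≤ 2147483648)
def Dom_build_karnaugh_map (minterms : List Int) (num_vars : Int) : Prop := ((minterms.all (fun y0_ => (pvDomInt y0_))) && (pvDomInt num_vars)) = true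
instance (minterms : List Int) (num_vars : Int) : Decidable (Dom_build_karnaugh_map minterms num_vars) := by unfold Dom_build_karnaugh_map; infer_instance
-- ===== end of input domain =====

-- B replaces A's per-cell 'decimal in minterms' list scan by a dict index decimal -> cell positions
-- built in one cell scan, then scatters 1s for the minterms (objective: alternative fill strategy;
-- cell decimals are computed exactly as in A).

-- ===== PORT A =====
-- format(g, f'0{w}b') : binary digits (Nat.toDigits 2 gives '0'/'1' chars, "0" for 0) left-padded with '0' to width w — exact
def pvPad (w : Nat) (l : List Char) : List Char := List.replicate (w - l.length) '0' ++ l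

-- get_coordinates(num_bits): Gray-code strings; '1 << k' ported as 2 ^ k (exact for k ≥ 0)
def pvGray (numBits : Nat) : List (List Char) :=
  (List.range (2 ^ numBits)).map (fun i => pvPad numBits (Nat.toDigits 2 (i ^^^ (i >>> 1))))

-- int(binary, 2) for a string of '0'/'1' chars — exact on that domain (the only strings A builds)
def pvParseBin (l : List Char) : Int := l.foldl (fun a c => 2 * a + (if c = '1' then 1 else 0)) 0

-- the 'binary' string of cell (i, j); s[k] out of range is an IndexError in Python (only reachable
-- for num_vars ≤ 0, outside Pre_), ported with default '0'
def pvCellBin (num_vars : Int) (rg cg : List (List Char)) (i j : Nat) : List Char :=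
  let ri := rg.getD i []
  let cj := cg.getD j []
  if num_vars = 1 then ri
  else if num_vars = 2 then [ri.getD 0 '0', cj.getD 0 '0']
  else if num_vars = 3 then [ri.getD 0 '0', cj.getD 0 '0', cj.getD 1 '0']
  else if num_vars = 4 then [ri.getD 0 '0', ri.getD 1 '0', cj.getD 0 '0', cj.getD 1 '0']
  else [ri.getD 0 '0', ri.getD 1 '0', cj.getD 0 '0', cj.getD 1 '0', cj.getD 2 '0']

def get_karnaugh_map_size (num_vars : Int) : Int × Int :=
  if num_vars = 2 then (2, 2)
  else if num_vars = 3 then (2, 4)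
  else if num_vars = 4 then (4, 4)
  else ((2 : Int) ^ (PySem.Int.floordiv num_vars 2).toNat,
        (2 : Int) ^ (PySem.Int.floordiv (num_vars + 1) 2).toNat)

def build_karnaugh_map (minterms : List Int) (num_vars : Int) : List (List Int) :=
  let sz := get_karnaugh_map_size num_vars
  let row_gray := pvGray (PySem.Int.floordiv num_vars 2).toNat
  let col_gray := pvGray (PySem.Int.floordiv (num_vars + 1) 2).toNat
  (List.range sz.1.toNat).map (fun i =>
    (List.range sz.2.toNat).map (fun j =>
      if minterms.contains (pvParseBin (pvCellBin num_vars row_gray col_gray i j)) then 1 else 0))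

-- ===== PORT B =====
-- k_map[i][j] = 1
def pvSetCell : List (List Int) → Nat → Nat → List (List Int)
  | [], _, _ => []
  | r :: rs, 0, j => r.set j 1 :: rs
  | r :: rs, i + 1, j => r :: pvSetCell rs i j

def build_karnaugh_map_alt (minterms : List Int) (num_vars : Int) : List (List Int) :=
  let rows := (2 : Nat) ^ (PySem.Int.floordiv num_vars 2).toNat
  let cols := (2 : Nat) ^ (PySem.Int.floordiv (num_vars + 1) 2).toNat
  let row_gray := pvGray (PySem.Int.floordiv num_vars 2).toNat
  let col_gray := pvGray (PySem.Int.floordiv (num_vars + 1) 2).toNat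
  -- positions.setdefault(d, []).append((i, j))  =  modify d [] (· ++ [(i, j)])
  let positions : PySem.Dict Int (List (Nat × Nat)) :=
    (List.range rows).foldl (fun d i =>
      (List.range cols).foldl (fun d j =>
        d.modify (pvParseBin (pvCellBin num_vars row_gray col_gray i j)) [] (· ++ [(i, j)])) d)
      PySem.Dict.empty
  let k0 : List (List Int) := List.replicate rows (List.replicate cols 0)
  minterms.foldl (fun g m =>
    (positions.getD m []).foldl (fun g p => pvSetCell g p.1 p.2) g) k0

-- ===== PRECONDITION & SPEC =====
-- A raises for num_vars ≤ 0 (IndexError at 0: the Gray strings are too short for the indexing;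
-- ValueError below 0: negative shift count), so those inputs are excluded; A returns on every num_vars ≥ 1.
def Pre_build_karnaugh_map (minterms : List Int) (num_vars : Int) : Prop := 1 ≤ num_vars
instance (minterms : List Int) (num_vars : Int) : Decidable (Pre_build_karnaugh_map minterms num_vars) := by unfold Pre_build_karnaugh_map; infer_instance

def pvWitness_build_karnaugh_map : List Int × Int := ([0, 3, 5], 3)

def Spec_build_karnaugh_map (minterms : List Int) (num_vars : Int) (out : List (List Int)) : Prop := out = build_karnaugh_map_alt minterms num_vars
instance (minterms : List Int) (num_vars : Int) (out : List (List Int)) : Decidable (Spec_build_karnaugh_map minterms num_vars out) := by unfold Spec_build_karnaugh_map; infer_instance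

-- ===== CLAIM (what is proved, stated in full; the proofs are below) =====
def Claim_equal_build_karnaugh_map : Prop := ∀ (minterms : List Int) (num_vars : Int), Dom_build_karnaugh_map minterms num_vars → Pre_build_karnaugh_map minterms num_vars → Spec_build_karnaugh_map minterms num_vars (build_karnaugh_map minterms num_vars)

-- ===== LEMMAS AND PROOFS =====

-- the cell decimal both programs compute
def pvD (num_vars : Int) (i j : Nat) : Int :=
  pvParseBin (pvCellBin num_vars
    (pvGray (PySem.Int.floordiv num_vars 2).toNat)
    (pvGray (PySem.Int.floordiv (num_vars + 1) 2).toNat) i j)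

-- the cell list B's dict is built from
def pvCells (num_vars : Int) : List (Int × (Nat × Nat)) :=
  (List.range ((2 : Nat) ^ (PySem.Int.floordiv num_vars 2).toNat)).flatMap (fun i =>
    (List.range ((2 : Nat) ^ (PySem.Int.floordiv (num_vars + 1) 2).toNat)).map (fun j =>
      (pvD num_vars i j, (i, j))))

-- the positions recorded for decimal m
def pvPos (num_vars : Int) (m : Int) : List (Nat × Nat) :=
  ((pvCells num_vars).filter (fun p => p.1 == m)).map (·.2)

-- the cell (i, j) of a grid, as both programs read it
def pvCellAt (g : List (List Int)) (i j : Nat) : Int := (g[i]?.getD [])[j]?.getD 0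

lemma size_eq (num_vars : Int) :
    get_karnaugh_map_size num_vars =
      ((2 : Int) ^ (PySem.Int.floordiv num_vars 2).toNat,
       (2 : Int) ^ (PySem.Int.floordiv (num_vars + 1) 2).toNat) := by
  unfold get_karnaugh_map_size
  split_ifs with h2 h3 h4 <;> first | rfl | (subst_vars; decide)

lemma cellAt_replicate (R C i j : Nat) :
    pvCellAt (List.replicate R (List.replicate C (0:Int))) i j = 0 := by
  unfold pvCellAt
  rcases Nat.lt_or_ge i R with hi | hi
  · rw [List.getElem?_replicate_of_lt hi]
    simp only [Option.getD_some]
    rcases Nat.lt_or_ge j C with hj | hj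
    · rw [List.getElem?_replicate_of_lt hj]; rfl
    · rw [List.getElem?_eq_none (by simpa using hj)]; rfl
  · rw [List.getElem?_eq_none (show (List.replicate R (List.replicate C (0:Int))).length ≤ i by simpa using hi)]
    rfl

lemma setCell_length (g : List (List Int)) (i j : Nat) : (pvSetCell g i j).length = g.length := by
  induction g generalizing i with
  | nil => rfl
  | cons r rs ih => cases i <;> simp [pvSetCell, ih]

lemma setCell_row_length (g : List (List Int)) (i j k : Nat) :
    ((pvSetCell g i j)[k]?.getD []).length = (g[k]?.getD []).length := by
  induction g generalizing i k with
  | nil => rfl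
  | cons r rs ih =>
    cases i with
    | zero => cases k <;> simp [pvSetCell]
    | succ i' => cases k <;> simp [pvSetCell, ih]

lemma setCell_cell (g : List (List Int)) (i j i' j' : Nat)
    (hi : i < g.length) (hj : j < (g[i]?.getD []).length) :
    pvCellAt (pvSetCell g i j) i' j' = if i' = i ∧ j' = j then 1 else pvCellAt g i' j' := by
  induction g generalizing i i' with
  | nil => simp at hi
  | cons r rs ih =>
    cases i with
    | zero =>
      simp only [List.getElem?_cons_zero, Option.getD_some] at hj
      cases i' with
      | zero =>
        unfold pvCellAt
        simp only [pvSetCell, List.getElem?_cons_zero, Option.getD_some, true_and]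
        by_cases hjj : j' = j
        · subst hjj
          rw [List.getElem?_set_self (by simpa using hj)]
          simp
        · simp only [hjj, if_false]
          rw [List.getElem?_set_ne (by omega)]
      | succ k => simp [pvCellAt, pvSetCell]
    | succ i0 =>
      cases i' with
      | zero => simp [pvCellAt, pvSetCell]
      | succ k =>
        have := ih i0 k (by simpa using hi) (by simpa using hj)
        simpa [pvCellAt, pvSetCell, Nat.succ_inj] using this

lemma scatter_length (ps : List (Nat × Nat)) (g : List (List Int)) :
    (ps.foldl (fun g p => pvSetCell g p.1 p.2) g).length = g.length := by
  induction ps generalizing g with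
  | nil => rfl
  | cons p ps ih => rw [List.foldl_cons, ih, setCell_length]

lemma scatter_row_length (ps : List (Nat × Nat)) (g : List (List Int)) (k : Nat) :
    ((ps.foldl (fun g p => pvSetCell g p.1 p.2) g)[k]?.getD []).length = (g[k]?.getD []).length := by
  induction ps generalizing g with
  | nil => rfl
  | cons p ps ih => rw [List.foldl_cons, ih, setCell_row_length]

-- scattering a list of in-range positions writes 1 exactly at those positions
lemma scatter_cell (ps : List (Nat × Nat)) (g : List (List Int)) (i j : Nat)
    (hps : ∀ p ∈ ps, p.1 < g.length ∧ p.2 < (g[p.1]?.getD []).length) :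
    pvCellAt (ps.foldl (fun g p => pvSetCell g p.1 p.2) g) i j =
      if (i, j) ∈ ps then 1 else pvCellAt g i j := by
  induction ps generalizing g with
  | nil => simp
  | cons p ps ih =>
    have hp := hps p (by simp)
    rw [List.foldl_cons, ih _ (fun q hq => by
      have hq' := hps q (List.mem_cons_of_mem _ hq)
      refine ⟨by rw [setCell_length]; exact hq'.1, by rw [setCell_row_length]; exact hq'.2⟩)]
    rw [setCell_cell g p.1 p.2 i j hp.1 hp.2]
    by_cases hmem : (i, j) ∈ ps
    · simp [hmem]
    · by_cases hij : i = p.1 ∧ j = p.2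
      · have hp' : (i, j) = p := by cases p; simp_all
        simp [hij]
      · have hp' : ¬ (i, j) = p := by cases p; simp_all
        simp [hmem, hij, hp']

-- B's dict characterization: positions.getD m [] lists exactly the cells with decimal m
lemma positions_getD (num_vars : Int) (m : Int) :
    (((List.range ((2:Nat) ^ (PySem.Int.floordiv num_vars 2).toNat)).foldl (fun d i =>
        (List.range ((2:Nat) ^ (PySem.Int.floordiv (num_vars + 1) 2).toNat)).foldl (fun d j =>
          d.modify (pvD num_vars i j) [] (· ++ [(i, j)])) d)
        (PySem.Dict.empty : PySem.Dict Int (List (Nat × Nat)))).getD m []) = pvPos num_vars m := by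
  have hfold :
      ((List.range ((2:Nat) ^ (PySem.Int.floordiv num_vars 2).toNat)).foldl (fun d i =>
        (List.range ((2:Nat) ^ (PySem.Int.floordiv (num_vars + 1) 2).toNat)).foldl (fun d j =>
          d.modify (pvD num_vars i j) [] (· ++ [(i, j)])) d)
        (PySem.Dict.empty : PySem.Dict Int (List (Nat × Nat)))) =
      ((pvCells num_vars).foldl (fun d p => d.modify p.1 [] (· ++ [p.2])) PySem.Dict.empty) := by
    rw [pvCells, List.foldl_flatMap]
    simp only [List.foldl_map]
  rw [hfold, PySem.Dict.getD_foldl_modify_append, pvPos]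
  simp

lemma mem_positions (num_vars : Int) (m : Int) (i j : Nat) :
    ((i, j) ∈ pvPos num_vars m) ↔
      (i < (2:Nat) ^ (PySem.Int.floordiv num_vars 2).toNat ∧
       j < (2:Nat) ^ (PySem.Int.floordiv (num_vars + 1) 2).toNat ∧
       pvD num_vars i j = m) := by
  unfold pvPos pvCells
  simp only [List.mem_map, List.mem_filter, List.mem_flatMap, List.mem_range, List.mem_map,
    beq_iff_eq]
  constructor
  · rintro ⟨⟨v, i', j'⟩, ⟨⟨i2, hi2, j2, hj2, heq⟩, hv⟩, h2⟩
    simp only [Prod.mk.injEq] at heq h2 hv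
    obtain ⟨hd, rfl, rfl⟩ := heq
    obtain ⟨rfl, rfl⟩ := h2
    subst hv
    exact ⟨hi2, hj2, hd⟩
  · rintro ⟨hi, hj, hd⟩
    exact ⟨(pvD num_vars i j, (i, j)), ⟨⟨i, hi, j, hj, rfl⟩, hd⟩, rfl⟩

-- the full scatter loop over the minterms, cell by cell
lemma outer_cell (num_vars : Int) (ms : List Int) (i j : Nat)
    (hi : i < (2:Nat) ^ (PySem.Int.floordiv num_vars 2).toNat)
    (hj : j < (2:Nat) ^ (PySem.Int.floordiv (num_vars + 1) 2).toNat) :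
    ∀ g : List (List Int),
      g.length = (2:Nat) ^ (PySem.Int.floordiv num_vars 2).toNat →
      (∀ k, k < (2:Nat) ^ (PySem.Int.floordiv num_vars 2).toNat →
        (g[k]?.getD []).length = (2:Nat) ^ (PySem.Int.floordiv (num_vars + 1) 2).toNat) →
      pvCellAt (ms.foldl (fun g m => (pvPos num_vars m).foldl (fun g p => pvSetCell g p.1 p.2) g) g) i j =
        if pvD num_vars i j ∈ ms then 1 else pvCellAt g i j := by
  induction ms with
  | nil => intro g _ _; simp
  | cons m ms ih =>
    intro g hlen hrow
    rw [List.foldl_cons,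
      ih _ (by rw [scatter_length]; exact hlen)
        (fun k hk => by rw [scatter_row_length]; exact hrow k hk),
      scatter_cell _ _ _ _ (fun p hp => by
        have hr := (mem_positions num_vars m p.1 p.2).mp (by simpa using hp)
        exact ⟨by rw [hlen]; exact hr.1, by rw [hrow p.1 hr.1]; exact hr.2.1⟩)]
    by_cases hms : pvD num_vars i j ∈ ms
    · simp [hms]
    · by_cases hm : pvD num_vars i j = m
      · have hi' := hi; have hj' := hj
        rw [PySem.Int.floordiv_eq_ediv_of_pos (by norm_num)] at hi'
        rw [PySem.Int.floordiv_eq_ediv_of_pos (by norm_num)] at hj'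
        simp [hm, mem_positions, hi', hj']
      · simp [hms, hm, mem_positions]

lemma getElem_eq_cellAt (g : List (List Int)) (i j : Nat) (hi : i < g.length)
    (hj : j < (g[i]'hi).length) : (g[i]'hi)[j]'hj = pvCellAt g i j := by
  unfold pvCellAt
  rw [List.getElem?_eq_getElem hi, Option.getD_some, List.getElem?_eq_getElem hj, Option.getD_some]

lemma outer_length (num_vars : Int) (ms : List Int) (g : List (List Int)) :
    (ms.foldl (fun g m => (pvPos num_vars m).foldl (fun g p => pvSetCell g p.1 p.2) g) g).length = g.length := by
  induction ms generalizing g with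
  | nil => rfl
  | cons m ms ih => rw [List.foldl_cons, ih, scatter_length]

lemma outer_row_length (num_vars : Int) (ms : List Int) (g : List (List Int)) (k : Nat) :
    ((ms.foldl (fun g m => (pvPos num_vars m).foldl (fun g p => pvSetCell g p.1 p.2) g) g)[k]?.getD []).length = (g[k]?.getD []).length := by
  induction ms generalizing g with
  | nil => rfl
  | cons m ms ih => rw [List.foldl_cons, ih, scatter_row_length]

theorem build_karnaugh_map_spec : Claim_equal_build_karnaugh_map := by
  intro minterms num_vars _hdom _hpre
  unfold Spec_build_karnaugh_map build_karnaugh_map build_karnaugh_map_alt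
  rw [size_eq]
  show (List.range ((2:Nat) ^ (PySem.Int.floordiv num_vars 2).toNat)).map (fun i =>
      (List.range ((2:Nat) ^ (PySem.Int.floordiv (num_vars + 1) 2).toNat)).map (fun j =>
        if minterms.contains (pvD num_vars i j) then 1 else 0)) =
    minterms.foldl (fun g m =>
      ((((List.range ((2:Nat) ^ (PySem.Int.floordiv num_vars 2).toNat)).foldl (fun d i =>
        (List.range ((2:Nat) ^ (PySem.Int.floordiv (num_vars + 1) 2).toNat)).foldl (fun d j =>
          d.modify (pvD num_vars i j) [] (· ++ [(i, j)])) d)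
        (PySem.Dict.empty : PySem.Dict Int (List (Nat × Nat)))).getD m [])).foldl
        (fun g p => pvSetCell g p.1 p.2) g)
      (List.replicate ((2:Nat) ^ (PySem.Int.floordiv num_vars 2).toNat)
        (List.replicate ((2:Nat) ^ (PySem.Int.floordiv (num_vars + 1) 2).toNat) (0:Int)))
  simp only [positions_getD]
  have hk0row : ∀ k, k < (2:Nat) ^ (PySem.Int.floordiv num_vars 2).toNat →
      (((List.replicate ((2:Nat) ^ (PySem.Int.floordiv num_vars 2).toNat)
        (List.replicate ((2:Nat) ^ (PySem.Int.floordiv (num_vars + 1) 2).toNat) (0:Int)))[k]?.getD []).length) =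
      (2:Nat) ^ (PySem.Int.floordiv (num_vars + 1) 2).toNat := by
    intro k hk
    rw [List.getElem?_replicate_of_lt hk]
    simp
  apply List.ext_getElem
  · simp [outer_length]
  · intro i hiA hiB
    have hi : i < (2:Nat) ^ (PySem.Int.floordiv num_vars 2).toNat := by
      simpa using hiA
    have hFlen : (minterms.foldl (fun g m => (pvPos num_vars m).foldl (fun g p => pvSetCell g p.1 p.2) g)
        (List.replicate ((2:Nat) ^ (PySem.Int.floordiv num_vars 2).toNat)
          (List.replicate ((2:Nat) ^ (PySem.Int.floordiv (num_vars + 1) 2).toNat) (0:Int)))).length =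
        (2:Nat) ^ (PySem.Int.floordiv num_vars 2).toNat := by
      rw [outer_length]; simp
    have hrowF := outer_row_length num_vars minterms
      (List.replicate ((2:Nat) ^ (PySem.Int.floordiv num_vars 2).toNat)
        (List.replicate ((2:Nat) ^ (PySem.Int.floordiv (num_vars + 1) 2).toNat) (0:Int))) i
    rw [List.getElem?_eq_getElem (by omega), Option.getD_some, hk0row i hi] at hrowF
    apply List.ext_getElem
    · rw [List.getElem_map, List.length_map, List.length_range]
      exact hrowF.symm
    · intro j hjA hjB
      have hj : j < (2:Nat) ^ (PySem.Int.floordiv (num_vars + 1) 2).toNat := by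
        simp only [List.getElem_map, List.length_map, List.length_range] at hjA
        exact hjA
      have hcell := outer_cell num_vars minterms i j hi hj
        (List.replicate ((2:Nat) ^ (PySem.Int.floordiv num_vars 2).toNat)
          (List.replicate ((2:Nat) ^ (PySem.Int.floordiv (num_vars + 1) 2).toNat) (0:Int)))
        (by simp) hk0row
      rw [cellAt_replicate] at hcell
      simp only [List.getElem_map, List.getElem_range]
      rw [getElem_eq_cellAt, hcell]
      simp [List.contains_eq_mem]
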